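-- pv_equiv track=rewrite | github.com/koii-network/prometheus-beta | src/array_processor.py | process_array
-- ===== SOURCE A (Python) =====
-- def process_array(numbers):
--     """
--     Process an array of numbers by:
--     1. Multiplying every third number by 2
--     2. Finding the sum of even numbers, excluding modified numbers
--
--     Args:
--         numbers (list): A list of numbers to process
--
--     Returns:
--         int: Sum of even numbers that were not modified
--
--     Raises:
--         TypeError: If input is not a list
--         ValueError: If list contains non-numeric elements
--     """
--     # Validate input
--     if not isinstance(numbers, list):
--         raise TypeError("Input must be a list")
--
--     # Check for non-numeric elements
--     if any(not isinstance(x, (int, float)) for x in numbers):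
--         raise ValueError("All elements must be numeric")
--
--     # Create a copy of the original list to avoid modifying the input
--     processed_numbers = numbers.copy()
--
--     # Multiply every third number by 2
--     for i in range(2, len(processed_numbers), 3):
--         processed_numbers[i] *= 2
--
--     # Sum even numbers, excluding modified numbers
--     total = 0
--     for i, num in enumerate(numbers):
--         # Skip numbers that were modified (every third number)
--         if i % 3 == 2:
--             continue
--
--         # Check if the original number is even
--         if num % 2 == 0:
--             total += num
--
--     return total
-- ===== SOURCE B (Python) =====
-- def process_array(numbers):
--     # Same validation as A, in the same order.
--     if not isinstance(numbers, list):
--         raise TypeError("Input must be a list")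
--     if any(not isinstance(x, (int, float)) for x in numbers):
--         raise ValueError("All elements must be numeric")
--
--     # Group-of-three traversal: each triple contributes only its first two
--     # positions (the every-third position is excluded by never being sliced in).
--     total = 0
--     for i in range(0, len(numbers), 3):
--         for v in numbers[i:i + 2]:
--             if v % 2 == 0:
--                 total += v
--     return total
-- ===== Notes on version B (the rewrite author's own statement) =====
-- stated objective: simpler
-- what changed: Drops A's dead processed_numbers copy/multiply loop and replaces the per-element i%3==2 skip in an enumerated pass by a traversal in groups of three that sums the even values of each group's first two positions.
import Mathlib
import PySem

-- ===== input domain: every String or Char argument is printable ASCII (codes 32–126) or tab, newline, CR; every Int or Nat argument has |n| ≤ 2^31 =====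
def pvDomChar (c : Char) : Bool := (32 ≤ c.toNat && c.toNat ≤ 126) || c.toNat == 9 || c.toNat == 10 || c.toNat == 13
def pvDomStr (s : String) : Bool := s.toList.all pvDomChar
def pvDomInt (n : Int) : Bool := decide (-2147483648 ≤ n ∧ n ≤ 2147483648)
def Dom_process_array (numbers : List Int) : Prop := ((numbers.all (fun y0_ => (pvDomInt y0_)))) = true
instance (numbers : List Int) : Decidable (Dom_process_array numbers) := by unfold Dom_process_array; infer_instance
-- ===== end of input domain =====

-- B drops A's dead copy/multiply loop and sums even values by groups of three (first two
-- positions of each group) instead of an enumerated pass with an i%3==2 skip; simpler, same cost.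


-- ===== PORT A =====
-- literal transliteration of A: the copy + every-third *2 loop (dead: 'total' reads 'numbers'),
-- then an enumerated pass skipping i % 3 == 2 and adding even originals
def process_array (numbers : List Int) : Int :=
  let processed_numbers :=
    (PySem.List.pyRange 2 (numbers.length : Int) 3).foldl
      (fun l i => l.set i.toNat (l.getD i.toNat 0 * 2)) numbers
  let _ := processed_numbers  -- unused afterwards, as in A
  (PySem.List.enumerate numbers 0).foldl
    (fun total p =>
      if PySem.Int.mod p.1 3 == 2 then total
      else if PySem.Int.mod p.2 2 == 0 then total + p.2 else total) 0

-- ===== PORT B =====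
def pvEvenAdd (x : Int) : Int := if PySem.Int.mod x 2 == 0 then x else 0

-- group-of-three traversal: each group contributes the even values of its first two positions
def altGo : List Int → Int
  | [] => 0
  | [a] => pvEvenAdd a
  | [a, b] => pvEvenAdd a + pvEvenAdd b
  | a :: b :: _ :: t => pvEvenAdd a + pvEvenAdd b + altGo t

def process_array_alt (numbers : List Int) : Int := altGo numbers

-- ===== PRECONDITION & SPEC =====
def Spec_process_array (numbers : List Int) (out : Int) : Prop := out = process_array_alt numbers
instance (numbers : List Int) (out : Int) : Decidable (Spec_process_array numbers out) := by unfold Spec_process_array; infer_instance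

-- ===== CLAIM (what is proved, stated in full; the proofs are below) =====
def Claim_equal_process_array : Prop := ∀ (numbers : List Int), Dom_process_array numbers → Spec_process_array numbers (process_array numbers)

-- ===== LEMMAS AND PROOFS =====

theorem pv_fold_eq_altGo (xs : List Int) : ∀ (k t : Int), PySem.Int.mod k 3 = 0 →
    (PySem.List.enumerate xs k).foldl
      (fun total p =>
        if PySem.Int.mod p.1 3 == 2 then total
        else if PySem.Int.mod p.2 2 == 0 then total + p.2 else total) t
      = t + altGo xs := by
  induction xs using altGo.induct with
  | case1 => intro k t _; simp [PySem.List.enumerate, altGo]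
  | case2 a =>
    intro k t hk
    rw [PySem.Int.mod_eq_emod_of_pos (by omega)] at hk
    have h1 : ¬ (k % 3 = 2) := by omega
    simp [PySem.List.enumerate, altGo, pvEvenAdd, h1]
    split_ifs <;> omega
  | case3 a b =>
    intro k t hk
    rw [PySem.Int.mod_eq_emod_of_pos (by omega)] at hk
    have h1 : ¬ (k % 3 = 2) := by omega
    have h2 : ¬ ((k + 1) % 3 = 2) := by omega
    simp [PySem.List.enumerate, altGo, pvEvenAdd, h1, h2]
    split_ifs <;> omega
  | case4 a b c t' ih =>
    intro k t hk
    rw [PySem.Int.mod_eq_emod_of_pos (by omega)] at hk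
    have h1 : ¬ (k % 3 = 2) := by omega
    have h2 : ¬ ((k + 1) % 3 = 2) := by omega
    have h3 : (k + 1 + 1) % 3 = 2 := by omega
    have hk3 : PySem.Int.mod (k + 1 + 1 + 1) 3 = 0 := by
      rw [PySem.Int.mod_eq_emod_of_pos (by omega)]; omega
    simp only [PySem.List.enumerate, List.foldl]
    rw [ih _ _ hk3]
    simp [altGo, pvEvenAdd, h1, h2, h3]
    split_ifs <;> omega

-- ===== VERDICT (by name: the statement is the Claim_ definition above) =====
theorem process_array_spec : Claim_equal_process_array := by
  intro numbers _
  unfold Spec_process_array process_array process_array_alt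
  rw [pv_fold_eq_altGo numbers 0 0 (by decide)]
  ring
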